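-- pv_equiv track=rewrite | github.com/lesh23/CodingTest_Practice | SG/Lv1.py | solution
-- ===== SOURCE A (Python) =====
-- def solution(sizes):
--     answer = 0
--     long = []
--     short = []
--     for i in sizes:
--         long.append(max(i))
--         short.append(min(i))
--     return max(long)*max(short)
-- ===== SOURCE B (Python) =====
-- def solution(sizes):
--     best = None
--     for card in sizes:
--         lo, hi = min(card), max(card)
--         if best is None:
--             best = (hi, lo)
--         else:
--             ml, ms = best
--             if hi > ml:
--                 ml = hi
--             if lo > ms:
--                 ms = lo
--             best = (ml, ms)
--     return best[0] * best[1]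
-- ===== Notes on version B (the rewrite author's own statement) =====
-- stated objective: simpler
-- what changed: Single pass maintaining two running scalar maxima (seeded from the first card) instead of building two intermediate lists and scanning each with max afterwards.
import Mathlib
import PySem

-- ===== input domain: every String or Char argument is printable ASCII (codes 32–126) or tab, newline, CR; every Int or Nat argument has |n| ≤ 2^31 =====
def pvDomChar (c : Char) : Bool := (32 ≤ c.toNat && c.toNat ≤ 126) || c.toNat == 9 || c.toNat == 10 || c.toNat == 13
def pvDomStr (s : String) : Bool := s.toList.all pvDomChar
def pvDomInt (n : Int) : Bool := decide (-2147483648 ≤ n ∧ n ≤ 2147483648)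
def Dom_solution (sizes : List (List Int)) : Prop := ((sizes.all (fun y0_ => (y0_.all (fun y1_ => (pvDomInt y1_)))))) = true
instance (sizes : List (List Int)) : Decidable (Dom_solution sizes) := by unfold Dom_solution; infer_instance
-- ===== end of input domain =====

-- B replaces A's two intermediate lists with one pass keeping two running scalar maxima; return value only, objective: simpler.

-- ===== PORT A =====
-- A builds lists long/short by appending max(i)/min(i) per card, then returns max(long)*max(short).
-- max()/min() on an empty list raise ValueError (max?/min? = none); those inputs are outside Pre_,
-- so the .getD 0 defaults are never reached on admitted inputs.
def solution (sizes : List (List Int)) : Int :=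
  let ls := sizes.foldl
    (fun (ls : List Int × List Int) i =>
      (ls.1 ++ [(PySem.List.max? i (fun y => y)).getD 0],
       ls.2 ++ [(PySem.List.min? i (fun y => y)).getD 0]))
    ([], [])
  (PySem.List.max? ls.1 (fun y => y)).getD 0 * (PySem.List.max? ls.2 (fun y => y)).getD 0

-- ===== PORT B =====
-- Single pass: best = none, then per card update running (max_long, max_short); crash on
-- empty sizes / empty card is outside Pre_ (defaults never reached on admitted inputs).
def solution_alt (sizes : List (List Int)) : Int :=
  let best := sizes.foldl
    (fun (best : Option (Int × Int)) card =>
      let lo := (PySem.List.min? card (fun y => y)).getD 0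
      let hi := (PySem.List.max? card (fun y => y)).getD 0
      match best with
      | none => some (hi, lo)
      | some (ml, ms) =>
          some (if hi > ml then hi else ml, if lo > ms then lo else ms))
    none
  match best with
  | some (ml, ms) => ml * ms
  | none => 0

-- ===== PRECONDITION & SPEC =====
-- Pre_ excludes exactly the inputs on which A raises ValueError: empty sizes, or any empty card.
def Pre_solution (sizes : List (List Int)) : Prop :=
  sizes ≠ [] ∧ ∀ c ∈ sizes, c ≠ []
instance (sizes : List (List Int)) : Decidable (Pre_solution sizes) := by
  unfold Pre_solution; infer_instance
def pvWitness_solution : List (List Int) := [[60, 50], [30, 70], [60, 30]]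

def Spec_solution (sizes : List (List Int)) (out : Int) : Prop := out = solution_alt sizes
instance (sizes : List (List Int)) (out : Int) : Decidable (Spec_solution sizes out) := by unfold Spec_solution; infer_instance

-- ===== CLAIM (what is proved, stated in full; the proofs are below) =====
def Claim_equal_solution : Prop := ∀ (sizes : List (List Int)), Dom_solution sizes → Pre_solution sizes → Spec_solution sizes (solution sizes)

-- ===== LEMMAS AND PROOFS =====

-- abbreviations used only in the proofs
def pvF (c : List Int) : Int := (PySem.List.max? c (fun y => y)).getD 0
def pvG (c : List Int) : Int := (PySem.List.min? c (fun y => y)).getD 0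

lemma A_fold (sizes : List (List Int)) (L S : List Int) :
    sizes.foldl
      (fun (ls : List Int × List Int) i =>
        (ls.1 ++ [(PySem.List.max? i (fun y => y)).getD 0],
         ls.2 ++ [(PySem.List.min? i (fun y => y)).getD 0]))
      (L, S)
    = (L ++ sizes.map pvF, S ++ sizes.map pvG) := by
  induction sizes generalizing L S with
  | nil => simp
  | cons c rest ih => simp [List.foldl_cons, ih, pvF, pvG]

lemma B_fold (rest : List (List Int)) (ml ms : Int) :
    rest.foldl
      (fun (best : Option (Int × Int)) card =>
        let lo := (PySem.List.min? card (fun y => y)).getD 0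
        let hi := (PySem.List.max? card (fun y => y)).getD 0
        match best with
        | none => some (hi, lo)
        | some (ml, ms) =>
            some (if hi > ml then hi else ml, if lo > ms then lo else ms))
      (some (ml, ms))
    = some (rest.foldl (fun a c => max a (pvF c)) ml,
            rest.foldl (fun a c => max a (pvG c)) ms) := by
  induction rest generalizing ml ms with
  | nil => simp
  | cons c t ih =>
      simp only [List.foldl_cons, ih, pvF, pvG]
      have hm : ∀ a b : Int, (if b > a then b else a) = max a b := by
        intro a b; split_ifs with h <;> omega
      rw [hm, hm]

lemma max_map_cons (f : List Int → Int) (c : List Int) (rest : List (List Int)) :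
    (PySem.List.max? ((c :: rest).map f) (fun y => y)).getD 0
    = rest.foldl (fun a x => max a (f x)) (f c) := by
  simp [List.map_cons, PySem.List.max?_id_cons, List.foldl_map]

-- ===== VERDICT (by name: the statement is the Claim_ definition above) =====
theorem solution_spec : Claim_equal_solution := by
  intro sizes _ hpre
  obtain ⟨hne, _⟩ := hpre
  unfold Spec_solution solution solution_alt
  obtain ⟨c, rest, rfl⟩ := List.exists_cons_of_ne_nil hne
  simp only [A_fold, List.nil_append]
  rw [max_map_cons pvF, max_map_cons pvG]
  simp only [List.foldl_cons]
  rw [B_fold]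
  rfl
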